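-- pv_equiv track=rewrite | github.com/hatuyen4994/bioinfo-3 | bioinfo3.py | breakpoints_number
-- ===== SOURCE A (Python) =====
-- def breakpoints_number(P):
--     #Calculate the breakpoint numbers
--     #If the first and the last permutation aren't in placed. They will be counted as break points
--     bp_n = 0
--     #The first
--     if P[0] != 1:
--         bp_n += 1
--     #The last
--     if P[-1] != len(P):
--         bp_n += 1
--     #All the between
--     for k in range(0,len(P)-1):
--         if P[k+1] - P[k] != 1:
--             bp_n += 1
--     return bp_n
-- ===== SOURCE B (Python) =====
-- def breakpoints_number(P):
--     n = len(P)
--     Q = [0] + list(P) + [n + 1]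
--     def count(lo, hi):
--         # breakpoints among the adjacent pairs (i, i+1) of Q with lo <= i < hi
--         if hi - lo == 1:
--             return int(Q[hi] - Q[lo] != 1)
--         mid = (lo + hi) // 2
--         return count(lo, mid) + count(mid, hi)
--     return count(0, n + 1)
-- ===== Notes on version B (the rewrite author's own statement) =====
-- stated objective: alternative
-- what changed: B counts breakpoints by divide-and-conquer recursion over index segments of the augmented sequence [0]+P+[n+1], splitting at the midpoint, instead of A's three staged checks (first element, last element, linear index loop).
import Mathlib
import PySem

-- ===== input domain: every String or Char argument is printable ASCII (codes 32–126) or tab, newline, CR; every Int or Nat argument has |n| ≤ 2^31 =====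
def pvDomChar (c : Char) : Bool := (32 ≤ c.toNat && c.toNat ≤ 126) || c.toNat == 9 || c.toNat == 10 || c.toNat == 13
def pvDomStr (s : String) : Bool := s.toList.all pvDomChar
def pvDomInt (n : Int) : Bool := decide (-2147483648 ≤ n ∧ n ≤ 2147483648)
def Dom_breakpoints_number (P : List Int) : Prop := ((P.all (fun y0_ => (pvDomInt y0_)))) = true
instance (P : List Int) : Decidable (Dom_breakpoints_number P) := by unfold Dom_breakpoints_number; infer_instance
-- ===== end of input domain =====

-- B counts breakpoints by divide-and-conquer over index segments of the augmented sequence [0]+P+[n+1] instead of A's staged boundary checks plus linear index loop (alternative, same cost).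

-- ===== PORT A =====
def breakpoints_number (P : List Int) : Int :=
  -- bp_n = 0; if P[0] != 1: bp_n += 1
  let bp1 : Int := if PySem.List.pyGetD P 0 0 ≠ 1 then 0 + 1 else 0
  -- if P[-1] != len(P): bp_n += 1
  let bp2 : Int := if PySem.List.pyGetD P (-1) 0 ≠ (P.length : Int) then bp1 + 1 else bp1
  -- for k in range(0, len(P)-1): if P[k+1] - P[k] != 1: bp_n += 1
  (PySem.List.pyRange 0 ((P.length : Int) - 1) 1).foldl
    (fun bp k => if PySem.List.pyGetD P (k + 1) 0 - PySem.List.pyGetD P k 0 ≠ 1 then bp + 1 else bp)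
    bp2

-- ===== PORT B =====
-- def count(lo, hi): breakpoints among adjacent pairs (i, i+1) of Q with lo <= i < hi
-- (the 'hi - lo ≤ 1' base-case guard only totalises the recursion: count is only called with hi - lo ≥ 1)
def pvCount (Q : List Int) (lo hi : Int) : Int :=
  if hi - lo ≤ 1 then
    -- if hi - lo == 1: return int(Q[hi] - Q[lo] != 1)
    (if PySem.List.pyGetD Q hi 0 - PySem.List.pyGetD Q lo 0 ≠ 1 then 1 else 0)
  else
    -- mid = (lo + hi) // 2; return count(lo, mid) + count(mid, hi)
    pvCount Q lo (PySem.Int.floordiv (lo + hi) 2) + pvCount Q (PySem.Int.floordiv (lo + hi) 2) hi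
termination_by (hi - lo).toNat
decreasing_by
  all_goals
    have h2 : PySem.Int.floordiv (lo + hi) 2 = (lo + hi) / 2 :=
      PySem.Int.floordiv_eq_ediv_of_pos (by omega)
    omega

def breakpoints_number_alt (P : List Int) : Int :=
  -- n = len(P); Q = [0] + list(P) + [n + 1]; return count(0, n + 1)
  let Q : List Int := 0 :: P ++ [(P.length : Int) + 1]
  pvCount Q 0 ((P.length : Int) + 1)

-- ===== PRECONDITION & SPEC =====
-- Pre_ excludes only the empty list, on which A raises IndexError indexing the first element.
def Pre_breakpoints_number (P : List Int) : Prop := P ≠ []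
instance (P : List Int) : Decidable (Pre_breakpoints_number P) := by unfold Pre_breakpoints_number; infer_instance
def pvWitness_breakpoints_number : List Int := [3, 1, 2]

def Spec_breakpoints_number (P : List Int) (out : Int) : Prop := out = breakpoints_number_alt P
instance (P : List Int) (out : Int) : Decidable (Spec_breakpoints_number P out) := by unfold Spec_breakpoints_number; infer_instance

-- ===== CLAIM (what is proved, stated in full; the proofs are below) =====
def Claim_equal_breakpoints_number : Prop := ∀ (P : List Int), Dom_breakpoints_number P → Pre_breakpoints_number P → Spec_breakpoints_number P (breakpoints_number P)

-- ===== LEMMAS AND PROOFS =====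

-- adjacent-pair indicator at position i of a list
def pvInd (Q : List Int) (i : Nat) : Int :=
  if Q.getD (i + 1) 0 - Q.getD i 0 ≠ 1 then 1 else 0

-- adjacent-pair indicator sum (structural recursion used by the proofs)
def pvZipSum : List Int → Int
  | a :: b :: r => (if b - a ≠ 1 then 1 else 0) + pvZipSum (b :: r)
  | _ => 0

theorem pvZipSum_append_last (L : List Int) (a x : Int) :
    pvZipSum ((a :: L) ++ [x]) = pvZipSum (a :: L) + (if x - (a :: L).getLast (by simp) ≠ 1 then 1 else 0) := by
  induction L generalizing a with
  | nil => simp [pvZipSum]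
  | cons b r ih =>
    have h : ((a :: b :: r) ++ [x]) = a :: ((b :: r) ++ [x]) := by simp
    rw [h]
    show (if b - a ≠ 1 then (1:Int) else 0) + pvZipSum ((b :: r) ++ [x]) = _
    rw [ih b]
    simp only [pvZipSum, List.getLast_cons_cons]
    exact (add_assoc _ _ _).symm

-- indicator sum over the first len-1 positions equals the adjacent-pair sum
theorem pvSum_range (P : List Int) :
    ((List.range (P.length - 1)).map (pvInd P)).sum = pvZipSum P := by
  match P with
  | [] => rfl
  | [a] => rfl
  | a :: b :: r =>
    have hl : (a :: b :: r).length - 1 = r.length + 1 := by simp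
    rw [hl, List.range_succ_eq_map]
    simp only [List.map_cons, List.map_map, List.sum_cons]
    have hmaps : ((List.range r.length).map (pvInd (a :: b :: r) ∘ Nat.succ))
        = (List.range ((b :: r).length - 1)).map (pvInd (b :: r)) := by
      simp only [List.length_cons, Nat.add_sub_cancel]
      apply List.map_congr_left
      intro k _
      simp [Function.comp, pvInd]
    rw [hmaps, pvSum_range (b :: r)]
    simp [pvZipSum, pvInd]

-- B's divide-and-conquer count equals the indicator sum over its segment
theorem pvCount_eq_aux (Q : List Int) : ∀ (N : Nat) (lo hi : Int), (hi - lo).toNat ≤ N → 0 ≤ lo → lo < hi →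
    pvCount Q lo hi = ((List.range (hi - lo).toNat).map (fun k => pvInd Q (lo.toNat + k))).sum := by
  intro N
  induction N with
  | zero => intro lo hi hN h0 h1; omega
  | succ N ih =>
    intro lo hi hN h0 h1
    rw [pvCount]
    by_cases hbase : hi - lo ≤ 1
    · rw [if_pos hbase]
      have hhi : hi = lo + 1 := by omega
      have ht : (hi - lo).toNat = 1 := by omega
      have e1 : PySem.List.pyGetD Q lo 0 = Q.getD lo.toNat 0 := by
        conv_lhs => rw [show lo = ((lo.toNat : Nat) : Int) by omega]
        rw [PySem.List.pyGetD_natCast]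
      have e2 : PySem.List.pyGetD Q hi 0 = Q.getD (lo.toNat + 1) 0 := by
        conv_lhs => rw [show hi = ((lo.toNat + 1 : Nat) : Int) by omega]
        rw [PySem.List.pyGetD_natCast]
      rw [e1, e2, ht]
      simp [List.range_succ, pvInd]
    · rw [if_neg hbase]
      rw [PySem.Int.floordiv_eq_ediv_of_pos (a := lo + hi) (b := 2) (by omega)]
      set m := (lo + hi) / 2 with hm
      have hb1 : lo + 1 ≤ m := by omega
      have hb2 : m ≤ hi - 1 := by omega
      rw [ih lo m (by omega) h0 (by omega), ih m hi (by omega) (by omega) (by omega)]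
      have hsplit : (hi - lo).toNat = (m - lo).toNat + (hi - m).toNat := by omega
      rw [hsplit, List.range_add, List.map_append, List.sum_append]
      congr 1
      rw [List.map_map]
      refine congrArg List.sum (List.map_congr_left ?_)
      intro k _
      have hk : lo.toNat + ((m - lo).toNat + k) = m.toNat + k := by omega
      simp only [Function.comp, hk]

theorem pvCount_eq (Q : List Int) (lo hi : Int) (h0 : 0 ≤ lo) (h1 : lo < hi) :
    pvCount Q lo hi = ((List.range (hi - lo).toNat).map (fun k => pvInd Q (lo.toNat + k))).sum :=
  pvCount_eq_aux Q (hi - lo).toNat lo hi le_rfl h0 h1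

-- A's index loop adds the adjacent-pair sum to its accumulator
theorem pvFold_eq (P : List Int) (acc : Int) :
    (PySem.List.pyRange 0 ((P.length : Int) - 1) 1).foldl
      (fun bp k => if PySem.List.pyGetD P (k + 1) 0 - PySem.List.pyGetD P k 0 ≠ 1 then bp + 1 else bp)
      acc = acc + pvZipSum P := by
  have hbody : (fun (bp : Int) (k : Int) => if PySem.List.pyGetD P (k + 1) 0 - PySem.List.pyGetD P k 0 ≠ 1 then bp + 1 else bp)
      = (fun bp k => bp + (if PySem.List.pyGetD P (k + 1) 0 - PySem.List.pyGetD P k 0 ≠ 1 then (1 : Int) else 0)) := by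
    funext bp k; split <;> ring
  rw [hbody, PySem.List.foldl_add, PySem.List.pyRange_one, List.map_map]
  have hcast : ((P.length : Int) - 1 - 0).toNat = P.length - 1 := by omega
  rw [hcast, ← pvSum_range P]
  congr 1
  congr 1
  apply List.map_congr_left
  intro k _
  have h2 : (0 : Int) + (k : Int) = ((k : Nat) : Int) := by omega
  simp only [Function.comp, h2, PySem.List.pyGetD_natCast, pvInd]
  rw [show ((k : Int) + 1) = ((k + 1 : Nat) : Int) by omega, PySem.List.pyGetD_natCast]

-- ===== VERDICT (by name: the statement is the Claim_ definition above) =====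
theorem breakpoints_number_spec : Claim_equal_breakpoints_number := by
  intro P _ hpre
  unfold Spec_breakpoints_number breakpoints_number breakpoints_number_alt
  match P, hpre with
  | a :: L, _ =>
    dsimp only
    rw [pvFold_eq]
    set n : Int := ((a :: L).length : Int) with hn
    set Q : List Int := 0 :: (a :: L) ++ [n + 1] with hQdef
    rw [pvCount_eq Q 0 (n + 1) (by omega) (by positivity)]
    have hlen : (n + 1 - 0).toNat = Q.length - 1 := by
      have : Q.length = (a :: L).length + 2 := by simp [hQdef]
      omega
    have hmap : ((List.range (n + 1 - 0).toNat).map (fun k => pvInd Q ((0:Int).toNat + k)))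
        = (List.range (Q.length - 1)).map (pvInd Q) := by
      rw [hlen]; apply List.map_congr_left; intro k _; simp
    rw [hmap, pvSum_range Q]
    have hQ : Q = 0 :: a :: (L ++ [n + 1]) := by simp [hQdef]
    rw [hQ]
    show _ = (if a - 0 ≠ 1 then (1:Int) else 0) + pvZipSum (a :: (L ++ [n + 1]))
    have hz : pvZipSum (a :: (L ++ [n + 1]))
        = pvZipSum (a :: L) + (if (n + 1) - (a :: L).getLast (by simp) ≠ 1 then 1 else 0) := by
      have := pvZipSum_append_last L a (n + 1)
      simpa using this
    rw [hz]
    rw [PySem.List.pyGetD_zero_cons, PySem.List.pyGetD_neg_one (a :: L) 0 (by simp)]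
    set g : Int := (a :: L).getLast (by simp) with hg
    by_cases h1 : a = 1 <;> by_cases h2 : g = n <;>
      simp [h1, h2] <;> split_ifs <;> omega
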